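-- pv_equiv track=rewrite | github.com/manwar/perlweeklychallenge-club | challenge-342/packy-anderson/python/ch-1.py | balance_str
-- ===== SOURCE A (Python) =====
-- def my_zip(longer, shorter, mystr):
--   mystr += longer.pop(0) + shorter.pop(0)
--   if len(shorter) > 0:
--     return my_zip(longer, shorter, mystr)
--   elif len(longer) > 0:
--     return mystr + longer.pop(0)
--   return mystr
--
-- def balance_str(mystr):
--   letters = sorted([
--     c for c in list(mystr) if not c.isnumeric()
--   ])
--   numbers = sorted([
--     c for c in list(mystr) if     c.isnumeric()
--   ])
--   if abs(len(letters) - len(numbers)) > 1: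
--     return ""
--   if len(letters) > len(numbers):
--     return my_zip(letters, numbers, "")
--   else:
--     return my_zip(numbers, letters, "")
-- ===== SOURCE B (Python) =====
-- def balance_str(mystr):
--   digits = sorted(c for c in mystr if c.isnumeric())
--   others = sorted(c for c in mystr if not c.isnumeric())
--   if abs(len(others) - len(digits)) > 1:
--     return ""
--   first, second = (others, digits) if len(others) > len(digits) else (digits, others)
--   out = "".join(a + b for a, b in zip(first, second))
--   return out + first[-1] if len(first) > len(second) else out
-- ===== Notes on version B (the rewrite author's own statement) =====
-- stated objective: simpler
-- what changed: Replaces the recursive accumulator-passing my_zip that destructively pops both list fronts with a direct zip/join interleaving plus one trailing element, no helper and no mutation.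
-- crash fix: On strings of length 0 or 1 A raises IndexError (my_zip pops from an empty list) while B returns the balanced string itself ("" or the single character). — e.g. on balance_str("a"): A raises IndexError, B returns "a"
import Mathlib
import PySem

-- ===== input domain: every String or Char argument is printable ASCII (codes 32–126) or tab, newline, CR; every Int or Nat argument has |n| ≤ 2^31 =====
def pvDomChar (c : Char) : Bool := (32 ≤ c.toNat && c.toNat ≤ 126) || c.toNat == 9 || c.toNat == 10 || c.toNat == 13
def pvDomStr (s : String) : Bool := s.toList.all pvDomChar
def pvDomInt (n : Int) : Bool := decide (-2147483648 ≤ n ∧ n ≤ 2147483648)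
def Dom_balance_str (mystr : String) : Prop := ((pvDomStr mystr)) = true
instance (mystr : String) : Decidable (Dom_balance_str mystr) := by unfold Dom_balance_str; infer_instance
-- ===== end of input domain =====

-- B replaces the recursive, list-popping my_zip by a direct zip/join interleaving (simpler; return value only).

-- ===== PORT A =====
-- my_zip pops both fronts; 'none' is exactly where Python's list.pop(0) raises IndexError.
-- c.isnumeric() is ported as PySem.Chars.isdigit: on the printable-ASCII domain the two agree (only '0'-'9').
def myZipA : List Char → List Char → List Char → Option (List Char)
  | a :: as, b :: bs, acc =>
    let acc' := acc ++ [a, b]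
    if bs.length > 0 then myZipA as bs acc'
    else if as.length > 0 then
      match as with
      | c :: _ => some (acc' ++ [c])
      | [] => none
    else some acc'
  | _, _, _ => none

def balance_str (mystr : String) : String :=
  let letters := PySem.List.sorted ((mystr.toList).filter (fun c => !(PySem.Chars.isdigit c))) (fun c => c) false
  let numbers := PySem.List.sorted ((mystr.toList).filter (fun c => PySem.Chars.isdigit c)) (fun c => c) false
  if ((letters.length : Int) - (numbers.length : Int)).natAbs > 1 then ""
  else if letters.length > numbers.length then
    match myZipA letters numbers [] with
    | some cs => String.ofList cs
    | none => ""        -- IndexError in Python; excluded by Pre_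
  else
    match myZipA numbers letters [] with
    | some cs => String.ofList cs
    | none => ""        -- IndexError in Python; excluded by Pre_

-- ===== PORT B =====
def balance_str_alt (mystr : String) : String :=
  let digits := PySem.List.sorted ((mystr.toList).filter (fun c => PySem.Chars.isdigit c)) (fun c => c) false
  let others := PySem.List.sorted ((mystr.toList).filter (fun c => !(PySem.Chars.isdigit c))) (fun c => c) false
  if ((others.length : Int) - (digits.length : Int)).natAbs > 1 then ""
  else
    let fs := if others.length > digits.length then (others, digits) else (digits, others)
    let out := (fs.1.zip fs.2).flatMap (fun p => [p.1, p.2])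
    if fs.1.length > fs.2.length then
      match PySem.List.pyGet? fs.1 (-1) with    -- first[-1]
      | some c => String.ofList (out ++ [c])
      | none => String.ofList out                   -- unreachable: fs.1 is nonempty there
    else String.ofList out

-- ===== PRECONDITION & SPEC =====
-- Pre_ excludes exactly the strings of length ≤ 1, on which A's my_zip pops from an empty list and raises IndexError.
def Pre_balance_str (mystr : String) : Prop := 2 ≤ mystr.toList.length
instance (mystr : String) : Decidable (Pre_balance_str mystr) := by unfold Pre_balance_str; infer_instance
def pvWitness_balance_str : String := "a1"

-- On strings of length 0 or 1 A raises IndexError while B returns the balanced string itself ("" or the single character); proved in balance_str_raises at the bottom.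
def Raises_balance_str (mystr : String) : Prop := mystr.toList.length ≤ 1
instance (mystr : String) : Decidable (Raises_balance_str mystr) := by unfold Raises_balance_str; infer_instance
def pvRaiseWitness_balance_str : String := "a"
def pvRaiseWitnessOut_balance_str : String := "a"

def Spec_balance_str (mystr : String) (out : String) : Prop := out = balance_str_alt mystr
instance (mystr : String) (out : String) : Decidable (Spec_balance_str mystr out) := by unfold Spec_balance_str; infer_instance

-- ===== CLAIM (what is proved, stated in full; the proofs are below) =====
def Claim_equal_balance_str : Prop := ∀ (mystr : String), Dom_balance_str mystr → Pre_balance_str mystr → Spec_balance_str mystr (balance_str mystr)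
def Claim_raises_balance_str : Prop := (∀ (mystr : String), Dom_balance_str mystr → Raises_balance_str mystr → ¬ Pre_balance_str mystr) ∧ (Dom_balance_str (pvRaiseWitness_balance_str) ∧ Raises_balance_str (pvRaiseWitness_balance_str) ∧ balance_str_alt (pvRaiseWitness_balance_str) = pvRaiseWitnessOut_balance_str)

-- ===== LEMMAS AND PROOFS =====

-- my_zip on a longer list L and a nonempty shorter list S (length gap ≤ 1) is the zip-interleaving plus L's leftover tail.
theorem myZipA_eq (S : List Char) : ∀ (L : List Char) (acc : List Char), S ≠ [] →
    S.length ≤ L.length → L.length ≤ S.length + 1 →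
    myZipA L S acc = some (acc ++ (L.zip S).flatMap (fun p => [p.1, p.2]) ++ L.drop S.length) := by
  induction S with
  | nil => intro _ _ h; exact absurd rfl h
  | cons b bs ih =>
    intro L acc _ h2 h3
    match L with
    | [] => simp at h2
    | a :: as =>
      simp only [List.length_cons] at h2 h3
      cases bs with
      | nil =>
        match as, h3 with
        | [], _ => simp [myZipA]
        | [c], _ => simp [myZipA]
        | _ :: _ :: _, h3 => simp at h3
      | cons b2 bs2 =>
        have has : as ≠ [] := by
          cases as with
          | nil => simp at h2
          | cons _ _ => simp
        have : myZipA (a :: as) (b :: b2 :: bs2) acc = myZipA as (b2 :: bs2) (acc ++ [a, b]) := by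
          simp [myZipA]
        rw [this, ih as (acc ++ [a, b]) (by simp) (by simp at h2 ⊢; omega) (by simp at h3 ⊢; omega)]
        simp

theorem drop_length_sub_one {α : Type} (xs : List α) (h : xs ≠ []) :
    xs.drop (xs.length - 1) = [xs.getLast h] := by
  induction xs with
  | nil => exact absurd rfl h
  | cons x xs ih =>
    cases xs with
    | nil => simp
    | cons y ys => simpa using ih (by simp)

theorem length_filter_partition (l : List Char) (p : Char → Bool) :
    (l.filter (fun c => ! p c)).length + (l.filter p).length = l.length := by
  induction l with
  | nil => rfl
  | cons x xs ih => by_cases h : p x <;> simp [h] <;> omega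

-- ===== VERDICT (by name: the statement is the Claim_ definition above) =====
theorem balance_str_spec : Claim_equal_balance_str := by
  intro mystr _ hpre
  unfold Spec_balance_str balance_str balance_str_alt
  set T := mystr.toList with hT
  set letters := PySem.List.sorted (T.filter (fun c => !(PySem.Chars.isdigit c))) (fun c => c) false with hl
  set numbers := PySem.List.sorted (T.filter (fun c => PySem.Chars.isdigit c)) (fun c => c) false with hn
  have hsum : letters.length + numbers.length = T.length := by
    rw [hl, hn, PySem.List.length_sorted, PySem.List.length_sorted]
    exact length_filter_partition T _
  have hT2 : 2 ≤ T.length := hpre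
  by_cases hgap : ((letters.length : Int) - (numbers.length : Int)).natAbs > 1
  · simp [hgap]
  · simp only [hgap, if_false]
    by_cases hlt : letters.length > numbers.length
    · -- letters is one longer; both interleave letters with numbers and append letters' last
      have hnum1 : 1 ≤ numbers.length := by omega
      have hlen : letters.length = numbers.length + 1 := by omega
      have hne : letters ≠ [] := by intro h; rw [h] at hlen; simp at hlen
      rw [myZipA_eq numbers letters [] (by intro h; rw [h] at hnum1; simp at hnum1)
        (by omega) (by omega)]
      have hget : PySem.List.pyGet? letters (-1) = some (letters.getLast hne) := by
        rw [PySem.List.pyGet?_neg_one, List.getLast?_eq_getLast_of_ne_nil hne]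
      simp only [hlt, if_true, hget]
      rw [show letters.drop numbers.length = [letters.getLast hne] by
        rw [show numbers.length = letters.length - 1 by omega]; exact drop_length_sub_one letters hne]
      simp
    · -- numbers first: tie (no leftover) or numbers one longer (append numbers' last)
      have hlet1 : 1 ≤ letters.length := by omega
      have hletne : letters ≠ [] := by intro h; rw [h] at hlet1; simp at hlet1
      rw [myZipA_eq letters numbers [] hletne (by omega) (by omega)]
      simp only [hlt, if_false]
      by_cases heq : numbers.length > letters.length
      · have hlen : numbers.length = letters.length + 1 := by omega
        have hne : numbers ≠ [] := by intro h; rw [h] at hlen; simp at hlen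
        have hget : PySem.List.pyGet? numbers (-1) = some (numbers.getLast hne) := by
          rw [PySem.List.pyGet?_neg_one, List.getLast?_eq_getLast_of_ne_nil hne]
        simp only [heq, if_true, hget]
        rw [show numbers.drop letters.length = [numbers.getLast hne] by
          rw [show letters.length = numbers.length - 1 by omega]; exact drop_length_sub_one numbers hne]
        simp
      · have hlen : numbers.length = letters.length := by omega
        simp only [heq, if_false]
        rw [List.drop_of_length_le (by omega)]
        simp

theorem balance_str_raises : Claim_raises_balance_str := by
  unfold Claim_raises_balance_str
  constructor
  · intro mystr _ hr
    unfold Raises_balance_str at hr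
    unfold Pre_balance_str
    omega
  · exact ⟨by decide, by decide, by decide⟩

-- self-check: the crash-fix witness value stated in pvRaiseWitnessOut_ is the one balance_str_raises proves
theorem balance_str_raises_witness_ok : balance_str_alt pvRaiseWitness_balance_str = pvRaiseWitnessOut_balance_str :=
  balance_str_raises.2.2.2
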